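-- pv_equiv track=rewrite | github.com/surabhishail/agentic-pr-review | devmind-agent/rag/ingest.py | chunk_by_function
-- ===== SOURCE A (Python) =====
-- def chunk_by_function(filepath, content):
--     chunks = []
--     lines = content.split("\n")
--     current_chunk = []
--     current_name = "module_level"
--
--     for line in lines:
--         # Only split on def/class, NOT on decorators
--         # Decorators stay attached to their function
--         stripped = line.strip()
--         if (line.startswith("def ") or line.startswith("class ")) and current_chunk:
--             # Save previous chunk
--             chunks.append({
--                 "text": "\n".join(current_chunk),
--                 "source": filepath,
--                 "function": current_name
--             })
--             current_name = stripped
--             current_chunk = [line]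
--         else:
--             current_chunk.append(line)
--
--     # Last chunk
--     if current_chunk:
--         chunks.append({
--             "text": "\n".join(current_chunk),
--             "source": filepath,
--             "function": current_name
--         })
--
--     return chunks
-- ===== SOURCE B (Python) =====
-- def chunk_by_function(filepath, content):
--     # Alternative decomposition: first split the lines into segments at def/class
--     # boundaries (first line never splits), then build one chunk per segment.
--     lines = content.split("\n")
--
--     def is_boundary(line):
--         return line.startswith("def ") or line.startswith("class ")
--
--     def split_segments(rest):
--         if not rest:
--             return []
--         i = 1
--         while i < len(rest) and not is_boundary(rest[i]):
--             i += 1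
--         return [rest[:i]] + split_segments(rest[i:])
--
--     segs = split_segments(lines)
--     if not segs:
--         return []
--     return [{"text": "\n".join(segs[0]), "source": filepath, "function": "module_level"}] + \
--            [{"text": "\n".join(seg), "source": filepath, "function": seg[0].strip()}
--             for seg in segs[1:]]
-- ===== Notes on version B (the rewrite author's own statement) =====
-- stated objective: alternative
-- what changed: B replaces A's single accumulator loop (current_chunk/current_name state with flushes) by a two-phase decomposition: recursively split the lines into segments at def/class boundaries (first line never splits), then build one chunk dict per segment.
import Mathlib
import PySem

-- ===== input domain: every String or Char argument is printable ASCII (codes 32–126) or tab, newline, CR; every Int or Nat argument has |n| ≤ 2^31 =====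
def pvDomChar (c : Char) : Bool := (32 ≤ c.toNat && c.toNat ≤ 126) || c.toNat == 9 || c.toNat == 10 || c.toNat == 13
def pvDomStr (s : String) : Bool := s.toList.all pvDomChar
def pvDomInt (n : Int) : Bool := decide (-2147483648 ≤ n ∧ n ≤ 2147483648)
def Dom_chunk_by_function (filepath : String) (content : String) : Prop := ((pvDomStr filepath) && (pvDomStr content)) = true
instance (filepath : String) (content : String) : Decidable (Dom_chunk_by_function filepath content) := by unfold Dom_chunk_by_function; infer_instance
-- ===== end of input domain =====

-- B replaces A's single accumulator loop by a two-phase decomposition (split the lines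
-- into segments at def/class boundaries, then build one chunk per segment); objective: alternative.


-- ===== PORT A =====
-- the chunk dict {"text": …, "source": …, "function": …}
def pvMk (filepath : String) (text : String) (name : String) : List (String × String) :=
  [("text", text), ("source", filepath), ("function", name)]

-- one loop iteration of A: state = (chunks, current_chunk, current_name)
def pvStepA (filepath : String)
    (st : List (List (String × String)) × List String × String) (line : String) :
    List (List (String × String)) × List String × String :=
  let stripped := PySem.Str.strip line
  if (PySem.Str.startswith line "def " || PySem.Str.startswith line "class ") && !st.2.1.isEmpty then
    (st.1 ++ [pvMk filepath (PySem.Str.join "\n" st.2.1) st.2.2], [line], stripped)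
  else
    (st.1, st.2.1 ++ [line], st.2.2)

def chunk_by_function (filepath : String) (content : String) : List (List (String × String)) :=
  -- content.split("\n"): sep ≠ "", so split? is some
  let lines := (PySem.Str.split? content "\n").getD []
  let st := lines.foldl (pvStepA filepath) ([], [], "module_level")
  if !st.2.1.isEmpty then st.1 ++ [pvMk filepath (PySem.Str.join "\n" st.2.1) st.2.2] else st.1

-- ===== PORT B =====
def pvIsBoundary (line : String) : Bool :=
  PySem.Str.startswith line "def " || PySem.Str.startswith line "class "

-- Source B's split_segments: rest[:i] is the head line plus the following non-boundary
-- lines (the while loop), rest[i:] the remainder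
def pvSplitSegments : List String → List (List String)
  | [] => []
  | x :: rest =>
      (x :: rest.takeWhile (fun l => !pvIsBoundary l)) ::
        pvSplitSegments (rest.dropWhile (fun l => !pvIsBoundary l))
termination_by l => l.length
decreasing_by
  have := List.length_dropWhile_le (fun l => !pvIsBoundary l) rest
  simp; omega

def chunk_by_function_alt (filepath : String) (content : String) : List (List (String × String)) :=
  let lines := (PySem.Str.split? content "\n").getD []
  match pvSplitSegments lines with
  | [] => []
  | first :: rest =>
      [("text", PySem.Str.join "\n" first), ("source", filepath), ("function", "module_level")] ::
        rest.map (fun seg =>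
          -- seg[0]: every segment is nonempty by construction
          [("text", PySem.Str.join "\n" seg), ("source", filepath),
           ("function", PySem.Str.strip (seg.headD ""))])

-- ===== PRECONDITION & SPEC =====
def Spec_chunk_by_function (filepath : String) (content : String) (out : List (List (String × String))) : Prop := out = chunk_by_function_alt filepath content
instance (filepath : String) (content : String) (out : List (List (String × String))) : Decidable (Spec_chunk_by_function filepath content out) := by unfold Spec_chunk_by_function; infer_instance

-- ===== CLAIM (what is proved, stated in full; the proofs are below) =====
def Claim_equal_chunk_by_function : Prop := ∀ (filepath : String) (content : String), Dom_chunk_by_function filepath content → Spec_chunk_by_function filepath content (chunk_by_function filepath content)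

-- ===== LEMMAS AND PROOFS =====

-- the chunk B builds for a non-first segment
def pvSegChunk (filepath : String) (seg : List String) : List (String × String) :=
  [("text", PySem.Str.join "\n" seg), ("source", filepath),
   ("function", PySem.Str.strip (seg.headD ""))]

-- A's loop from a nonempty current_chunk, followed by the final flush, produces: one
-- chunk extending current_chunk to the next boundary, then B's segment chunks.
lemma pv_loop (filepath : String) (lines : List String) :
    ∀ (chunks : List (List (String × String))) (cc : List String) (cn : String), cc ≠ [] →
    (let st := lines.foldl (pvStepA filepath) (chunks, cc, cn)
     if !st.2.1.isEmpty then st.1 ++ [pvMk filepath (PySem.Str.join "\n" st.2.1) st.2.2] else st.1)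
    = chunks ++ pvMk filepath (PySem.Str.join "\n" (cc ++ lines.takeWhile (fun l => !pvIsBoundary l))) cn ::
        (pvSplitSegments (lines.dropWhile (fun l => !pvIsBoundary l))).map (pvSegChunk filepath) := by
  induction lines with
  | nil =>
      intro chunks cc cn hcc
      simp [pvSplitSegments, hcc]
  | cons l ls ih =>
      intro chunks cc cn hcc
      by_cases hb : pvIsBoundary l
      · have hstep : pvStepA filepath (chunks, cc, cn) l =
            (chunks ++ [pvMk filepath (PySem.Str.join "\n" cc) cn], [l], PySem.Str.strip l) := by
          simp [pvStepA, pvIsBoundary] at hb ⊢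
          simp [hb, hcc]
        simp only [List.foldl_cons, hstep]
        rw [ih (chunks ++ [pvMk filepath (PySem.Str.join "\n" cc) cn]) [l] (PySem.Str.strip l) (by simp)]
        simp [hb, pvSplitSegments, pvSegChunk, pvMk]
      · have hstep : pvStepA filepath (chunks, cc, cn) l = (chunks, cc ++ [l], cn) := by
          simp [pvStepA, pvIsBoundary] at hb ⊢
          simp [hb]
        simp only [List.foldl_cons, hstep]
        rw [ih chunks (cc ++ [l]) cn (by simp)]
        simp [hb]

-- ===== VERDICT (by name: the statement is the Claim_ definition above) =====
theorem chunk_by_function_spec : Claim_equal_chunk_by_function := by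
  intro filepath content _
  unfold Spec_chunk_by_function chunk_by_function chunk_by_function_alt
  cases hl : (PySem.Str.split? content "\n").getD [] with
  | nil => simp [pvSplitSegments]
  | cons l ls =>
      have hstep : pvStepA filepath ([], [], "module_level") l = ([], [l], "module_level") := by
        simp [pvStepA]
      simp only [List.foldl_cons, hstep]
      have := pv_loop filepath ls [] [l] "module_level" (by simp)
      simp only at this
      rw [this]
      simp [pvSplitSegments, pvMk, pvSegChunk]
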